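-- pv_equiv track=rewrite | github.com/iinao/pythontest | postinumerot.py | ryhmittele_toimipaikkoihin
-- ===== SOURCE A (Python) =====
-- def ryhmittele_toimipaikkoihin(postinumerot):
--     toimipaikat = {}
--     for numero, tmp in postinumerot.items():
--         tmp = tmp.replace("-","").replace(" ","")
--         if tmp in toimipaikat:
--             toimipaikat[tmp].append(numero)
--         else:
--             toimipaikat[tmp] = [numero]
--
--     return toimipaikat
-- ===== SOURCE B (Python) =====
-- def ryhmittele_toimipaikkoihin(postinumerot):
--     items = [(tmp.replace("-", "").replace(" ", ""), numero)
--              for numero, tmp in postinumerot.items()]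
--     keys = list(dict.fromkeys(name for name, _ in items))
--     return {k: [n for name, n in items if name == k] for k in keys}
-- ===== Notes on version B (the rewrite author's own statement) =====
-- stated objective: alternative
-- what changed: Replaces the single-pass mutable dict bucketing with a functional pipeline: clean all names once, deduplicate the cleaned names in first-occurrence order, then build each group by a comprehension scanning the cleaned items.
import Mathlib
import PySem

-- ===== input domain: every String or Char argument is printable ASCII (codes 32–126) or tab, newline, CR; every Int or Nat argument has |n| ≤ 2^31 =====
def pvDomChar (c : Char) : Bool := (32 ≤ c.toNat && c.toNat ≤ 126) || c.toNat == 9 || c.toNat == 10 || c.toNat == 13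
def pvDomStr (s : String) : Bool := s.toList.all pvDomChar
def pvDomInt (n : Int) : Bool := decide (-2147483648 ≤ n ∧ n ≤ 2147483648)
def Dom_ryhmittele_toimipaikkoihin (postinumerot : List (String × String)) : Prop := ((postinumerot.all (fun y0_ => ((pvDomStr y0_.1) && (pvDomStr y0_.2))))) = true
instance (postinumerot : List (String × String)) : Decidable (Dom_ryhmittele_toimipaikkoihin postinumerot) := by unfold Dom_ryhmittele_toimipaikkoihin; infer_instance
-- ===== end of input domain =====

-- B replaces A's single-pass mutable-dict bucketing by a functional pipeline (clean all
-- names once, deduplicate the cleaned names in first-occurrence order, build each group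
-- by a scan of the cleaned items); same return value, no speed claim.

-- shared cleaning step: tmp.replace("-","").replace(" ","")
def pvClean (tmp : String) : String :=
  PySem.Str.replace (PySem.Str.replace tmp "-" "") " " ""

-- ===== PORT A =====
-- the dict 'toimipaikat' as an association list in insertion order;
-- 'tmp in toimipaikat' is a key test, 'toimipaikat[tmp].append(numero)' appends to
-- the (unique) entry for that key, 'toimipaikat[tmp] = [numero]' inserts at the end
def pvStepA (d : List (String × List String)) (p : String × String) :
    List (String × List String) :=
  let tmp := pvClean p.2
  if d.any (fun q => q.1 == tmp) then
    d.map (fun q => if q.1 == tmp then (q.1, q.2 ++ [p.1]) else q)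
  else
    d ++ [(tmp, [p.1])]

def ryhmittele_toimipaikkoihin (postinumerot : List (String × String)) :
    List (String × List String) :=
  postinumerot.foldl pvStepA []

-- ===== PORT B =====
-- list(dict.fromkeys(...)): the first occurrence of each name, in order
def pvDedup : List String → List String
  | [] => []
  | x :: xs => x :: pvDedup (xs.filter (fun y => !(y == x)))
  termination_by l => l.length
  decreasing_by
    simpa using Nat.lt_succ_of_le
      ((List.length_filter_le _ _).trans (List.length_attach (l := xs)).le)

def ryhmittele_toimipaikkoihin_alt (postinumerot : List (String × String)) :
    List (String × List String) :=
  let items := postinumerot.map (fun p => (pvClean p.2, p.1))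
  let keys := pvDedup (items.map (fun q => q.1))
  keys.map (fun k => (k, (items.filter (fun q => q.1 == k)).map (fun q => q.2)))

-- ===== PRECONDITION & SPEC =====
def Spec_ryhmittele_toimipaikkoihin (postinumerot : List (String × String)) (out : List (String × List String)) : Prop := out = ryhmittele_toimipaikkoihin_alt postinumerot
instance (postinumerot : List (String × String)) (out : List (String × List String)) : Decidable (Spec_ryhmittele_toimipaikkoihin postinumerot out) := by unfold Spec_ryhmittele_toimipaikkoihin; infer_instance

-- ===== CLAIM (what is proved, stated in full; the proofs are below) =====
def Claim_equal_ryhmittele_toimipaikkoihin : Prop := ∀ (postinumerot : List (String × String)), Dom_ryhmittele_toimipaikkoihin postinumerot → Spec_ryhmittele_toimipaikkoihin postinumerot (ryhmittele_toimipaikkoihin postinumerot)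

-- ===== LEMMAS AND PROOFS =====

-- abbreviations over the cleaned items (name, numero)
def pvVals (items : List (String × String)) (k : String) : List String :=
  (items.filter (fun q => q.1 == k)).map (fun q => q.2)

def pvB (items : List (String × String)) : List (String × List String) :=
  (pvDedup (items.map (fun q => q.1))).map (fun k => (k, pvVals items k))

def pvStep (d : List (String × List String)) (q : String × String) :
    List (String × List String) :=
  if d.any (fun e => e.1 == q.1) then
    d.map (fun e => if e.1 == q.1 then (e.1, e.2 ++ [q.2]) else e)
  else
    d ++ [(q.1, [q.2])]

theorem pvVals_cons (q : String × String) (items : List (String × String)) (k : String) :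
    pvVals (q :: items) k =
      if q.1 = k then q.2 :: pvVals items k else pvVals items k := by
  by_cases h : q.1 = k <;> simp [pvVals, h]

-- dropping items whose name is k' ≠ k does not change the group of k
theorem pvVals_filter (items : List (String × String)) (k : String)
    (p : String × String → Bool)
    (h : ∀ q ∈ items, q.1 = k → p q = true) :
    pvVals (items.filter p) k = pvVals items k := by
  induction items with
  | nil => rfl
  | cons q items ih =>
    have ih' := ih (fun r hr => h r (by simp [hr]))
    by_cases hk : q.1 = k
    · have hp := h q (by simp) hk
      simp [hp, pvVals_cons, hk, ih']
    · by_cases hp : p q = true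
      · simp [hp, pvVals_cons, hk, ih']
      · simp [hp, pvVals_cons, hk, ih']

theorem pvDedup_nil : pvDedup [] = [] := pvDedup.eq_1

theorem pvDedup_cons (x : String) (xs : List String) :
    pvDedup (x :: xs) = x :: pvDedup (xs.filter (fun y => !(y == x))) := pvDedup.eq_2 x xs

theorem mem_pvDedup : ∀ (l : List String) (k : String), k ∈ pvDedup l → k ∈ l
  | [], k, h => absurd h (by simp [pvDedup_nil])
  | x :: xs, k, h => by
    rw [pvDedup_cons] at h
    rcases List.mem_cons.mp h with h | h
    · simp [h]
    · exact List.mem_cons_of_mem _ (List.mem_of_mem_filter (mem_pvDedup _ _ h))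
  termination_by l => l.length
  decreasing_by
    simpa using Nat.lt_succ_of_le (List.length_filter_le _ _)

theorem pvDedup_map_filter (items : List (String × String)) (k : String) :
    ((items.filter (fun q => !(q.1 == k))).map (fun q => q.1)) =
      ((items.map (fun q => q.1)).filter (fun y => !(y == k))) := by
  induction items with
  | nil => rfl
  | cons q items ih =>
    by_cases h : q.1 = k <;> simp [h, ih]

theorem pvB_cons (q : String × String) (items : List (String × String)) :
    pvB (q :: items) =
      (q.1, q.2 :: pvVals items q.1) ::
        pvB (items.filter (fun r => !(r.1 == q.1))) := by
  unfold pvB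
  rw [List.map_cons, pvDedup_cons, pvDedup_map_filter, List.map_cons]
  congr 1
  · simp [pvVals_cons]
  · apply List.map_congr_left
    intro k hk
    have hkmem := mem_pvDedup _ _ hk
    have hkq : ¬ (k = q.1) := by
      simpa using List.of_mem_filter hkmem
    have h1 : pvVals (q :: items) k = pvVals items k := by
      rw [pvVals_cons, if_neg (fun hh : q.1 = k => hkq hh.symm)]
    have h2 : pvVals (items.filter (fun r => !(r.1 == q.1))) k = pvVals items k := by
      apply pvVals_filter
      intro r _ hr
      simp [hr, hkq]
    rw [h1, h2]

-- appending a number to an existing entry does not change the key set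
theorem pvAny_map (d : List (String × List String)) (t n k : String) :
    ((d.map (fun e => if e.1 == t then (e.1, e.2 ++ [n]) else e)).any
        (fun e => e.1 == k)) = d.any (fun e => e.1 == k) := by
  simp only [List.any_map]
  congr 1
  funext e
  by_cases h : e.1 = t <;> simp [h]

-- main invariant: folding pvStep from any accumulator
theorem pvFold_eq (items : List (String × String))
    (acc : List (String × List String)) :
    items.foldl pvStep acc =
      acc.map (fun e => (e.1, e.2 ++ pvVals items e.1)) ++
        pvB (items.filter (fun q => !(acc.any (fun e => e.1 == q.1)))) := by
  induction items generalizing acc with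
  | nil =>
    simp [pvB, pvVals, pvDedup_nil]
  | cons q items ih =>
    rw [List.foldl_cons, ih]
    by_cases h : (acc.any (fun e => e.1 == q.1)) = true
    · -- the key of q is already in the accumulator
      have hstep : pvStep acc q =
          acc.map (fun e => if e.1 == q.1 then (e.1, e.2 ++ [q.2]) else e) := by
        simp [pvStep, h]
      rw [hstep]
      have hfilter :
          (items.filter (fun r =>
              !((acc.map (fun e => if e.1 == q.1 then (e.1, e.2 ++ [q.2]) else e)).any
                 (fun e => e.1 == r.1)))) =
            items.filter (fun r => !(acc.any (fun e => e.1 == r.1))) := by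
        apply List.filter_congr
        intro r _
        rw [pvAny_map]
      have hfilter2 :
          ((q :: items).filter (fun r => !(acc.any (fun e => e.1 == r.1)))) =
            items.filter (fun r => !(acc.any (fun e => e.1 == r.1))) := by
        simp [h]
      rw [hfilter, hfilter2, List.map_map]
      congr 1
      apply List.map_congr_left
      intro e _
      simp only [Function.comp]
      by_cases he : e.1 = q.1
      · rw [pvVals_cons, if_pos he.symm]
        simp [he]
      · rw [pvVals_cons, if_neg (fun hh : q.1 = e.1 => he hh.symm)]
        simp [he]
    · -- new key: appended at the end of the accumulator
      have hstep : pvStep acc q = acc ++ [(q.1, [q.2])] := by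
        simp [pvStep, h]
      rw [hstep]
      have hnot : ∀ e ∈ acc, ¬ (e.1 = q.1) := by
        intro e he heq
        exact h (List.any_eq_true.mpr ⟨e, he, by simp [heq]⟩)
      have hfilter :
          (items.filter (fun r =>
              !(((acc ++ [(q.1, [q.2])]).any (fun e => e.1 == r.1))))) =
            ((items.filter (fun r => !(acc.any (fun e => e.1 == r.1)))).filter
              (fun r => !(r.1 == q.1))) := by
        rw [List.filter_filter]
        apply List.filter_congr
        intro r _
        simp only [List.any_append, List.any_cons, List.any_nil,
          Bool.or_false, Bool.not_or]
        by_cases hqr : q.1 = r.1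
        · simp [hqr, Bool.and_comm]
        · have hrq : ¬ r.1 = q.1 := fun hh => hqr hh.symm
          rw [beq_eq_false_iff_ne.mpr hqr, beq_eq_false_iff_ne.mpr hrq]
          simp
      have hfilter2 :
          ((q :: items).filter (fun r => !(acc.any (fun e => e.1 == r.1)))) =
            q :: items.filter (fun r => !(acc.any (fun e => e.1 == r.1))) := by
        simp [h]
      rw [hfilter, hfilter2, pvB_cons]
      have hv : pvVals (items.filter (fun r => !(acc.any (fun e => e.1 == r.1)))) q.1
          = pvVals items q.1 := by
        apply pvVals_filter
        intro r _ hr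
        rw [hr]
        cases hb : acc.any (fun e => e.1 == q.1) with
        | false => simp
        | true => exact absurd hb h
      rw [List.map_append, List.append_assoc]
      congr 1
      · apply List.map_congr_left
        intro e he
        have hne := hnot e he
        rw [pvVals_cons, if_neg (fun hh : q.1 = e.1 => hne hh.symm)]
      · simp [hv]

-- ===== VERDICT (by name: the statement is the Claim_ definition above) =====
theorem ryhmittele_toimipaikkoihin_spec : Claim_equal_ryhmittele_toimipaikkoihin := by
  intro ps _
  show ryhmittele_toimipaikkoihin ps = ryhmittele_toimipaikkoihin_alt ps
  have hA : ryhmittele_toimipaikkoihin ps =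
      (ps.map (fun p => (pvClean p.2, p.1))).foldl pvStep [] := by
    rw [ryhmittele_toimipaikkoihin, List.foldl_map]
    rfl
  rw [hA, pvFold_eq]
  simp [pvB, ryhmittele_toimipaikkoihin_alt, pvVals]
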